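-- pv_equiv track=rewrite | github.com/LingQi000809/Ghibli-chord-generation | rnn.py | create_datasets
-- ===== SOURCE A (Python) =====
-- def create_datasets(notes, char_to_int, seq_length):
--     """Generate sequences of a given seq_length to use as input for the RNN model"""
--     dataX = []
--     dataY = []
--     n_chars = len(notes)
--
--     for i in range(0, n_chars - seq_length, 1):
--         seq_in = notes[i:i + seq_length]
--         seq_out = notes[i + seq_length]
--         dataX.append([char_to_int[char] for char in seq_in])
--         dataY.append(char_to_int[seq_out])
--     return dataX, dataY
-- ===== SOURCE B (Python) =====
-- def create_datasets(notes, char_to_int, seq_length):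
--     """Generate sequences of a given seq_length to use as input for the RNN model"""
--     dataX = []
--     dataY = []
--     if len(notes) <= seq_length:
--         return dataX, dataY
--     window = []
--     for note in notes:
--         code = char_to_int[note]
--         if len(window) == seq_length:
--             dataX.append(window)
--             dataY.append(code)
--         window = window + [code]
--         if len(window) > seq_length:
--             window = window[1:]
--     return dataX, dataY
-- ===== Notes on version B (the rewrite author's own statement) =====
-- stated objective: alternative
-- what changed: B is a single left-to-right pass over notes that maintains a sliding window of the last seq_length codes as loop state (emit window+code when full, then push/trim), instead of A's index loop that re-slices notes and re-encodes every overlapping window.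
-- outside the precondition, e.g. on create_datasets(['a'], {'a': 0}, -1): A returns ([[], []], [0, 0]), B returns ([], [])
import Mathlib
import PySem

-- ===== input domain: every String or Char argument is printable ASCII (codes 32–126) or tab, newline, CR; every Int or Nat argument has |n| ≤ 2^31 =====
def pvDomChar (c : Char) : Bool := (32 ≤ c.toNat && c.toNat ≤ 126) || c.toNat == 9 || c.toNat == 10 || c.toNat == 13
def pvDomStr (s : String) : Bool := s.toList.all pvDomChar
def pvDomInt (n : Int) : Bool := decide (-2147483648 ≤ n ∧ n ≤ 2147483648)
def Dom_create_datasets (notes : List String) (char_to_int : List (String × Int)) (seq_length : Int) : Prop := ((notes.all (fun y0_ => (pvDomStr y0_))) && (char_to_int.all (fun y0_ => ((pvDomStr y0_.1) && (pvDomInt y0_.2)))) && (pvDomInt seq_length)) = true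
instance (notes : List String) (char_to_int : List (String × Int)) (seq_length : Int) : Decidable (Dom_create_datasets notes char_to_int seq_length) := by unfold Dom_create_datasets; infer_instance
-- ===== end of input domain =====

-- B replaces A's index loop (re-slicing and re-encoding every overlapping window) by one pass that
-- keeps a sliding window of codes as loop state. Return-value equivalence on Pre_.

-- ===== PORT A =====
-- dict lookup (first match); shared primitive for both ports, `.getD 0` is unreachable under Pre_ (KeyError is excluded)
def pvEnc (char_to_int : List (String × Int)) (ch : String) : Int :=
  ((PySem.Dict.mk char_to_int).get? ch).getD 0

def create_datasets (notes : List String) (char_to_int : List (String × Int)) (seq_length : Int) : List (List Int) × List Int :=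
  let dataX : List (List Int) := []
  let dataY : List Int := []
  let n_chars : Int := notes.length
  (PySem.List.pyRange 0 (n_chars - seq_length) 1).foldl
    (fun st i =>
      let seq_in := PySem.List.slice notes (some i) (some (i + seq_length))
      let seq_out := PySem.List.pyGetD notes (i + seq_length) ""   -- notes[i+seq_length]; in range under Pre_
      (st.1 ++ [seq_in.map (fun ch => pvEnc char_to_int ch)],
       st.2 ++ [pvEnc char_to_int seq_out]))
    (dataX, dataY)

-- ===== PORT B =====
def create_datasets_alt (notes : List String) (char_to_int : List (String × Int)) (seq_length : Int) : List (List Int) × List Int :=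
  let dataX : List (List Int) := []
  let dataY : List Int := []
  if (notes.length : Int) ≤ seq_length then (dataX, dataY)
  else
    let st := notes.foldl
      (fun st note =>
        let code := pvEnc char_to_int note
        let st :=
          if (st.2.2.length : Int) = seq_length
          then (st.1 ++ [st.2.2], st.2.1 ++ [code], st.2.2)
          else st
        let window := st.2.2 ++ [code]
        let window :=
          if seq_length < (window.length : Int)
          then PySem.List.slice window (some 1) none
          else window
        (st.1, st.2.1, window))
      (dataX, dataY, ([] : List Int))
    (st.1, st.2.1)

-- ===== PRECONDITION & SPEC =====
-- Pre_ excludes (a) negative seq_length — outside the task's natural domain, where A's behaviour rests on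
-- accidental negative-index wraparound and can also raise IndexError — and (b) inputs whose notes contain a
-- character missing from char_to_int while the loop runs, on which A raises KeyError.
def Pre_create_datasets (notes : List String) (char_to_int : List (String × Int)) (seq_length : Int) : Prop :=
  0 ≤ seq_length ∧
  ((notes.length : Int) ≤ seq_length ∨ ∀ ch ∈ notes, ((PySem.Dict.mk char_to_int).get? ch).isSome)
instance (notes : List String) (char_to_int : List (String × Int)) (seq_length : Int) : Decidable (Pre_create_datasets notes char_to_int seq_length) := by unfold Pre_create_datasets; infer_instance

def pvWitness_create_datasets : List String × (List (String × Int)) × Int :=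
  (["a", "b", "a", "c"], [("a", 0), ("b", 1), ("c", 2)], 2)

def Spec_create_datasets (notes : List String) (char_to_int : List (String × Int)) (seq_length : Int) (out : List (List Int) × List Int) : Prop := out = create_datasets_alt notes char_to_int seq_length
instance (notes : List String) (char_to_int : List (String × Int)) (seq_length : Int) (out : List (List Int) × List Int) : Decidable (Spec_create_datasets notes char_to_int seq_length out) := by unfold Spec_create_datasets; infer_instance

-- ===== CLAIM (what is proved, stated in full; the proofs are below) =====
def Claim_equal_create_datasets : Prop := ∀ (notes : List String) (char_to_int : List (String × Int)) (seq_length : Int), Dom_create_datasets notes char_to_int seq_length → Pre_create_datasets notes char_to_int seq_length → Spec_create_datasets notes char_to_int seq_length (create_datasets notes char_to_int seq_length)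

-- ===== LEMMAS AND PROOFS =====

-- A's loop, split into its two independent accumulators and turned into two maps.
theorem create_datasets_eq_maps (notes : List String) (char_to_int : List (String × Int)) (seq_length : Int) :
    create_datasets notes char_to_int seq_length =
      ((PySem.List.pyRange 0 ((notes.length : Int) - seq_length) 1).map
        (fun i => (PySem.List.slice notes (some i) (some (i + seq_length))).map (pvEnc char_to_int)),
       (PySem.List.pyRange 0 ((notes.length : Int) - seq_length) 1).map
        (fun i => pvEnc char_to_int (PySem.List.pyGetD notes (i + seq_length) ""))) := by
  unfold create_datasets
  rw [PySem.List.foldl_prod_mk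
    (f := fun acc i => acc ++ [(PySem.List.slice notes (some i) (some (i + seq_length))).map (pvEnc char_to_int)])
    (g := fun acc i => acc ++ [pvEnc char_to_int (PySem.List.pyGetD notes (i + seq_length) "")])]
  rw [PySem.List.foldl_append_singleton_eq_map, PySem.List.foldl_append_singleton_eq_map]
  simp

-- map commutes with a nonnegative slice
theorem map_slice_nonneg {α β : Type} (f : α → β) (xs : List α) (a b : Int) (ha : 0 ≤ a) (hb : 0 ≤ b) :
    (PySem.List.slice xs (some a) (some b)).map f =
      PySem.List.slice (xs.map f) (some a) (some b) := by
  rw [PySem.List.slice_toNat xs ha hb, PySem.List.slice_toNat (xs.map f) ha hb]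
  simp [List.map_take, List.map_drop]

-- B's loop body on the already-encoded stream, window length as a Nat
def pvStep (L : Nat) (st : List (List Int) × List Int × List Int) (c : Int) :
    List (List Int) × List Int × List Int :=
  let st := if st.2.2.length = L then (st.1 ++ [st.2.2], st.2.1 ++ [c], st.2.2) else st
  let w := st.2.2 ++ [c]
  (st.1, st.2.1, if L < w.length then w.tail else w)

theorem alt_body_eq (char_to_int : List (String × Int)) (L : Nat) :
    (fun (st : List (List Int) × List Int × List Int) (note : String) =>
        let code := pvEnc char_to_int note
        let st :=
          if (st.2.2.length : Int) = ((L : Nat) : Int)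
          then (st.1 ++ [st.2.2], st.2.1 ++ [code], st.2.2)
          else st
        let window := st.2.2 ++ [code]
        let window :=
          if ((L : Nat) : Int) < (window.length : Int)
          then PySem.List.slice window (some 1) none
          else window
        (st.1, st.2.1, window)) =
      (fun st note => pvStep L st (pvEnc char_to_int note)) := by
  funext st note
  simp only [pvStep, Nat.cast_inj, Nat.cast_lt, PySem.List.slice_from_one]

-- fill phase: while the window is not yet full, nothing is emitted and codes accumulate
theorem pvStep_fill (L : Nat) : ∀ (cs : List Int) (X : List (List Int)) (Y w : List Int),
    w.length + cs.length ≤ L → cs.foldl (pvStep L) (X, Y, w) = (X, Y, w ++ cs) := by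
  intro cs
  induction cs with
  | nil => intro X Y w _; simp
  | cons c cs ih =>
    intro X Y w h
    simp only [List.length_cons] at h
    have h1 : w.length ≠ L := by omega
    have h2 : ¬ L < (w ++ [c]).length := by simp; omega
    simp only [List.foldl_cons, pvStep, if_neg h1, if_neg h2]
    rw [ih X Y (w ++ [c]) (by simp; omega)]
    simp

-- the sequence of windows emitted by the sliding phase
def pvWins (w : List Int) : List Int → List (List Int)
  | [] => []
  | c :: cs => w :: pvWins ((w ++ [c]).tail) cs

-- slide phase: once full, each step emits the current window and the incoming code
theorem pvStep_slide (L : Nat) : ∀ (cs : List Int) (X : List (List Int)) (Y w : List Int),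
    w.length = L →
    (cs.foldl (pvStep L) (X, Y, w)).1 = X ++ pvWins w cs ∧
    (cs.foldl (pvStep L) (X, Y, w)).2.1 = Y ++ cs := by
  intro cs
  induction cs with
  | nil => intro X Y w _; simp [pvWins]
  | cons c cs ih =>
    intro X Y w hw
    have h2 : L < (w ++ [c]).length := by simp; omega
    simp only [List.foldl_cons, pvStep, if_pos hw, if_pos h2]
    have hlen : ((w ++ [c]).tail).length = L := by simp; omega
    obtain ⟨ih1, ih2⟩ := ih (X ++ [w]) (Y ++ [c]) ((w ++ [c]).tail) hlen
    refine ⟨?_, ?_⟩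
    · rw [ih1, pvWins]; simp
    · rw [ih2]; simp

-- the emitted windows are exactly the length-|w| slices of the full stream
theorem pvWins_eq_map : ∀ (cs w : List Int),
    pvWins w cs = (List.range cs.length).map (fun i => ((w ++ cs).drop i).take w.length) := by
  intro cs
  induction cs with
  | nil => intro w; simp [pvWins]
  | cons c cs ih =>
    intro w
    rw [pvWins, List.length_cons, List.range_succ_eq_map, List.map_cons, List.map_map]
    congr 1
    · simp [List.take_left']
    · rw [ih ((w ++ [c]).tail)]
      have hlen : ((w ++ [c]).tail).length = w.length := by simp
      rw [hlen]
      apply List.map_congr_left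
      intro i _
      simp only [Function.comp]
      have h1 : (w ++ [c]).tail ++ cs = (w ++ c :: cs).tail := by
        rw [← List.tail_append_of_ne_nil (by simp)]
        simp
      rw [h1, List.drop_tail]
  
-- ===== VERDICT (by name: the statement is the Claim_ definition above) =====
theorem create_datasets_spec : Claim_equal_create_datasets := by
  intro notes char_to_int seq_length _ hpre
  obtain ⟨hs, _⟩ := hpre
  obtain ⟨L, rfl⟩ : ∃ L : Nat, seq_length = (L : Int) := ⟨seq_length.toNat, by omega⟩
  unfold Spec_create_datasets create_datasets_alt
  by_cases hle : (notes.length : Int) ≤ (L : Int)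
  · simp only [if_pos hle]
    rw [create_datasets_eq_maps, PySem.List.pyRange_one_eq_nil (by omega)]
    simp
  · simp only [if_neg hle]
    rw [not_le] at hle
    have hLn : L < notes.length := by exact_mod_cast hle
    rw [alt_body_eq, ← List.foldl_map]
    set encoded := notes.map (pvEnc char_to_int) with henc
    have hlen : encoded.length = notes.length := by simp [henc]
    rw [show encoded = encoded.take L ++ encoded.drop L from (List.take_append_drop L encoded).symm,
        List.foldl_append]
    rw [pvStep_fill L (encoded.take L) [] [] [] (by simp)]
    simp only [List.nil_append]
    obtain ⟨h1, h2⟩ := pvStep_slide L (encoded.drop L) [] [] (encoded.take L)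
      (by simp [hlen]; omega)
    rw [create_datasets_eq_maps]
    refine Prod.ext ?_ ?_
    · -- dataX
      simp only [h1, List.nil_append]
      rw [pvWins_eq_map]
      have hwl : (encoded.take L).length = L := by simp [hlen]; omega
      have hdl : (encoded.drop L).length = notes.length - L := by simp [hlen]
      rw [hwl, hdl, List.take_append_drop, PySem.List.pyRange_one, List.map_map]
      have hb : ((notes.length : Int) - (L : Int) - 0).toNat = notes.length - L := by omega
      rw [hb]
      apply List.map_congr_left
      intro k hk
      simp only [Function.comp, zero_add]
      rw [map_slice_nonneg _ _ _ _ (by positivity) (by positivity), ← henc,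
          PySem.List.slice_natCast_add]
    · -- dataY
      simp only [h2, List.nil_append]
      calc (PySem.List.pyRange 0 ((notes.length : Int) - (L : Int)) 1).map
              (fun i => pvEnc char_to_int (PySem.List.pyGetD notes (i + (L : Int)) ""))
          = (PySem.List.pyRange 0 ((notes.length : Int) - (L : Int)) 1).map
              (fun i => PySem.List.pyGetD encoded (i + (L : Int)) (pvEnc char_to_int "")) := by
            apply List.map_congr_left
            intro i hi
            rw [PySem.List.mem_pyRange_one] at hi
            rw [PySem.List.pyGetD_eq_getElem notes "" (by omega) (by omega),
                PySem.List.pyGetD_eq_getElem encoded (pvEnc char_to_int "") (by omega)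
                  (by rw [hlen]; omega)]
            simp [henc]
        _ = (PySem.List.pyRange (L : Int) (notes.length : Int) 1).map
              (fun j => PySem.List.pyGetD encoded j (pvEnc char_to_int "")) := by
            rw [PySem.List.pyRange_one, PySem.List.pyRange_one, List.map_map, List.map_map]
            have hb : (((notes.length : Int) - (L : Int) - 0).toNat)
                = (((notes.length : Int) - (L : Int)).toNat) := by omega
            rw [hb]
            apply List.map_congr_left
            intro k _
            simp only [Function.comp]
            have h3 : (0 : Int) + (k : Int) + (L : Int) = (L : Int) + (k : Int) := by ring
            rw [h3]
        _ = encoded.drop L := by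
            rw [show ((notes.length : Int)) = ((encoded.length : Int)) by rw [hlen]]
            simpa [PySem.List.len] using
              PySem.List.map_pyGetD_pyRange encoded (pvEnc char_to_int "")
                (a := (L : Int)) (by positivity)
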